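-- pv_equiv track=rewrite | github.com/amirhossein-yousefi/text_image_multi_modal_vlm | src/text_image_multi_modal_vlm/smol_vlm.py | canonicalize_labels
-- ===== SOURCE A (Python) =====
-- from typing import List, Dict, Any, Optional
--
-- def canonicalize_labels(raw_labels: List[str], allowed: List[str]) -> List[str]:
--     allowed_set = set(allowed)
--     selected = [x for x in raw_labels if x in allowed_set]
--     uniq = []
--     for a in allowed:
--         if a in selected and a not in uniq:
--             uniq.append(a)
--     return uniq
-- ===== SOURCE B (Python) =====
-- def canonicalize_labels(raw_labels, allowed):
--     index = {}
--     for i, a in enumerate(allowed):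
--         if a not in index:
--             index[a] = i
--     present = {x for x in raw_labels if x in index}
--     return sorted(present, key=index.__getitem__)
-- ===== Notes on version B (the rewrite author's own statement) =====
-- stated objective: faster
-- what changed: Replaces A's scan of allowed with a list-membership test in the selected list (quadratic) by building a first-occurrence index dict once, collecting the set of raw labels that are index keys, and sorting that set by index rank.
import Mathlib
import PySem

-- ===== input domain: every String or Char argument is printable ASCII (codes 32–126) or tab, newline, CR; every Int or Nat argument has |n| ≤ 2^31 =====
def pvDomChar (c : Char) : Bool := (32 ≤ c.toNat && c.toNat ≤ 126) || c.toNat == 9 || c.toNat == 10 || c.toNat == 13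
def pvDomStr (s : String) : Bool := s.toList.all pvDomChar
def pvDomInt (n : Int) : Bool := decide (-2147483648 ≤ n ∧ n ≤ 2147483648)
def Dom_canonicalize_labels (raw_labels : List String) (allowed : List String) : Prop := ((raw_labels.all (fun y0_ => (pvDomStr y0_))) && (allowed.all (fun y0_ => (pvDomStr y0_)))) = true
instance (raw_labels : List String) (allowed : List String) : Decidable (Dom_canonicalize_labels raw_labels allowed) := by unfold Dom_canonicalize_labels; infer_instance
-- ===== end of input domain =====

-- B builds a first-occurrence index of allowed once and sorts the set of raw labels that are keys by that rank, replacing A's per-element list scan of selected (objective: faster, measured).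

-- ===== PORT A =====
def canonicalize_labels (raw_labels : List String) (allowed : List String) : List String :=
  let allowed_set : PySem.Set String := PySem.Set.ofList allowed
  let selected : List String := raw_labels.filter (fun x => PySem.Set.contains allowed_set x)
  allowed.foldl (fun uniq a => if selected.contains a && !uniq.contains a then uniq ++ [a] else uniq) ([] : List String)

-- ===== PORT B =====
-- index.__getitem__ is ported as `getD _ 0`: exact here because sorted is applied only to members of present, all of which are keys of index.
def canonicalize_labels_alt (raw_labels : List String) (allowed : List String) : List String :=
  let index : PySem.Dict String Int :=
    (PySem.List.enumerate allowed).foldl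
      (fun d p => if d.contains p.2 then d else d.insert p.2 p.1) PySem.Dict.empty
  let present : PySem.Set String :=
    PySem.Set.ofList (raw_labels.filter (fun x => index.contains x))
  PySem.List.sorted present (fun x => index.getD x 0) false

-- ===== PRECONDITION & SPEC =====
def Spec_canonicalize_labels (raw_labels : List String) (allowed : List String) (out : List String) : Prop := out = canonicalize_labels_alt raw_labels allowed
instance (raw_labels : List String) (allowed : List String) (out : List String) : Decidable (Spec_canonicalize_labels raw_labels allowed out) := by unfold Spec_canonicalize_labels; infer_instance

-- ===== CLAIM (what is proved, stated in full; the proofs are below) =====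
def Claim_equal_canonicalize_labels : Prop := ∀ (raw_labels : List String) (allowed : List String), Dom_canonicalize_labels raw_labels allowed → Spec_canonicalize_labels raw_labels allowed (canonicalize_labels raw_labels allowed)

-- ===== LEMMAS AND PROOFS =====

-- A's loop, written structurally: first occurrences (in order) of the elements of l satisfying p.
def pvFdf (p : String → Bool) : List String → List String
  | [] => []
  | a :: l => if p a then a :: (pvFdf p l).filter (fun b => b != a) else pvFdf p l

theorem mem_pvFdf (p : String → Bool) (l : List String) (a : String) :
    a ∈ pvFdf p l ↔ a ∈ l ∧ p a = true := by
  induction l with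
  | nil => simp [pvFdf]
  | cons x l ih =>
    by_cases hax : a = x
    · subst hax
      by_cases hx : p a = true <;> simp [pvFdf, hx, List.mem_filter, ih]
    · by_cases hx : p x = true <;> simp [pvFdf, hx, List.mem_filter, ih, hax]

theorem foldA (p : String → Bool) :
    ∀ (l acc : List String),
      l.foldl (fun uniq a => if p a && !uniq.contains a then uniq ++ [a] else uniq) acc
        = acc ++ (pvFdf p l).filter (fun b => !acc.contains b) := by
  intro l
  induction l with
  | nil => intro acc; simp [pvFdf]
  | cons x l ih =>
    intro acc
    by_cases hx : p x = true
    · have hfdf : pvFdf p (x :: l) = x :: (pvFdf p l).filter (fun b => b != x) := by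
        simp [pvFdf, hx]
      by_cases hmem : acc.contains x = true
      · have hxa : x ∈ acc := by simpa using hmem
        have hstep : (if p x && !acc.contains x then acc ++ [x] else acc) = acc := by
          simp [hx, hxa]
        rw [List.foldl_cons, hstep, ih, hfdf, List.filter_cons,
          if_neg (by simp [hxa]), List.filter_filter]
        congr 1
        apply List.filter_congr
        intro b _
        by_cases hbx : b = x
        · subst hbx; simp [hxa]
        · simp [hbx]
      · have hxa : x ∉ acc := by simpa using hmem
        have hstep : (if p x && !acc.contains x then acc ++ [x] else acc) = acc ++ [x] := by
          simp [hx, hxa]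
        rw [List.foldl_cons, hstep, ih, hfdf, List.filter_cons,
          if_pos (by simp [hxa]), List.filter_filter, List.append_assoc,
          List.singleton_append]
        congr 2
        apply List.filter_congr
        intro b _
        by_cases hbx : b = x
        · subst hbx; simp
        · simp [hbx]
    · have hx' : p x = false := by simpa using hx
      have hfdf : pvFdf p (x :: l) = pvFdf p l := by simp [pvFdf, hx']
      have hstep : (if p x && !acc.contains x then acc ++ [x] else acc) = acc := by
        simp [hx']
      rw [List.foldl_cons, hstep, ih, hfdf]

theorem pairwise_pvFdf (p : String → Bool) :
    ∀ l : List String, (pvFdf p l).Pairwise (fun a b => l.idxOf a < l.idxOf b) := by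
  intro l
  induction l with
  | nil => simp [pvFdf]
  | cons x l ih =>
    by_cases hx : p x = true
    · have hfdf : pvFdf p (x :: l) = x :: (pvFdf p l).filter (fun b => b != x) := by
        simp [pvFdf, hx]
      rw [hfdf]
      constructor
      · intro b hb
        have hbx : b ≠ x := by
          have := (List.mem_filter.mp hb).2; simpa using this
        have hbl : b ∈ l := ((mem_pvFdf p l b).mp (List.mem_filter.mp hb).1).1
        rw [List.idxOf_cons_self, List.idxOf_cons_ne _ (Ne.symm hbx)]
        omega
      · have h1 : ((pvFdf p l).filter (fun b => b != x)).Pairwise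
            (fun a b => l.idxOf a < l.idxOf b) := List.Pairwise.filter _ ih
        refine List.Pairwise.imp_of_mem ?_ h1
        intro a b ha hb hab
        have hax : a ≠ x := by have := (List.mem_filter.mp ha).2; simpa using this
        have hbx : b ≠ x := by have := (List.mem_filter.mp hb).2; simpa using this
        rw [List.idxOf_cons_ne _ (Ne.symm hax), List.idxOf_cons_ne _ (Ne.symm hbx)]
        omega
    · have hx' : p x = false := by simpa using hx
      have hfdf : pvFdf p (x :: l) = pvFdf p l := by simp [pvFdf, hx']
      rw [hfdf]
      refine List.Pairwise.imp_of_mem ?_ ih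
      intro a b ha hb hab
      have hax : a ≠ x := by
        intro h; subst h
        exact absurd ((mem_pvFdf p l a).mp ha).2 (by simp [hx'])
      have hbx : b ≠ x := by
        intro h; subst h
        exact absurd ((mem_pvFdf p l b).mp hb).2 (by simp [hx'])
      rw [List.idxOf_cons_ne _ (Ne.symm hax), List.idxOf_cons_ne _ (Ne.symm hbx)]
      omega

theorem nodup_pvFdf (p : String → Bool) (l : List String) : (pvFdf p l).Nodup := by
  refine List.Pairwise.imp_of_mem ?_ (pairwise_pvFdf p l)
  intro a b _ _ hab h
  subst h; omega

-- B's index dict.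
def pvIdx (allowed : List String) : PySem.Dict String Int :=
  (PySem.List.enumerate allowed).foldl
    (fun d p => if d.contains p.2 then d else d.insert p.2 p.1) PySem.Dict.empty

theorem idxFold_get? (a : String) :
    ∀ (l : List String) (s : Int) (d : PySem.Dict String Int),
      ((PySem.List.enumerate l s).foldl
          (fun d p => if d.contains p.2 then d else d.insert p.2 p.1) d).get? a
        = if d.contains a then d.get? a
          else if a ∈ l then some (s + (l.idxOf a : Int)) else none := by
  intro l
  induction l with
  | nil =>
    intro s d
    rw [PySem.List.enumerate_nil, List.foldl_nil]
    by_cases hda : d.contains a = true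
    · rw [if_pos hda]
    · rw [if_neg hda]
      simp only [List.not_mem_nil, if_false]
      exact (PySem.Dict.get?_eq_none_iff_contains d a).mpr (by simpa using hda)
  | cons x l ih =>
    intro s d
    rw [PySem.List.enumerate_cons, List.foldl_cons]
    by_cases hdx : d.contains x = true
    · rw [if_pos hdx, ih]
      by_cases hda : d.contains a = true
      · rw [if_pos hda, if_pos hda]
      · have hax : a ≠ x := fun h => hda (h ▸ hdx)
        rw [if_neg hda, if_neg hda]
        by_cases hal : a ∈ l
        · rw [if_pos hal, if_pos (List.mem_cons_of_mem _ hal),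
            List.idxOf_cons_ne _ (Ne.symm hax)]
          congr 1
          push_cast [Nat.succ_eq_add_one]
          ring
        · rw [if_neg hal, if_neg (by simp [hax, hal])]
    · rw [if_neg hdx, ih]
      by_cases hax : a = x
      · subst hax
        have hc : (d.insert a s).contains a = true := PySem.Dict.contains_insert_self d a s
        rw [if_pos hc, PySem.Dict.get?_insert_self, if_neg hdx,
          if_pos List.mem_cons_self, List.idxOf_cons_self]
        norm_num
      · have hc : (d.insert x s).contains a = d.contains a := by
          rw [PySem.Dict.contains_insert]
          simp [hax]
        rw [hc, PySem.Dict.get?_insert_of_ne d s hax]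
        by_cases hda : d.contains a = true
        · rw [if_pos hda, if_pos hda]
        · rw [if_neg hda, if_neg hda]
          by_cases hal : a ∈ l
          · rw [if_pos hal, if_pos (List.mem_cons_of_mem _ hal),
              List.idxOf_cons_ne _ (Ne.symm hax)]
            congr 1
            push_cast [Nat.succ_eq_add_one]
            ring
          · rw [if_neg hal, if_neg (by simp [hax, hal])]

theorem pvIdx_get? (allowed : List String) (a : String) :
    (pvIdx allowed).get? a = if a ∈ allowed then some ((allowed.idxOf a : Int)) else none := by
  rw [pvIdx, idxFold_get? a allowed 0 PySem.Dict.empty]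
  simp

theorem pvIdx_contains (allowed : List String) (a : String) :
    (pvIdx allowed).contains a = true ↔ a ∈ allowed := by
  rw [PySem.Dict.contains_eq_isSome_get?, pvIdx_get?]
  by_cases h : a ∈ allowed <;> simp [h]

theorem pvIdx_getD (allowed : List String) (a : String) (h : a ∈ allowed) :
    (pvIdx allowed).getD a 0 = (allowed.idxOf a : Int) := by
  rw [PySem.Dict.getD_eq_get?_getD, pvIdx_get?, if_pos h]
  rfl

-- ===== VERDICT (by name: the statement is the Claim_ definition above) =====
theorem canonicalize_labels_spec : Claim_equal_canonicalize_labels := by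
  intro raw allowed _
  unfold Spec_canonicalize_labels canonicalize_labels canonicalize_labels_alt
  simp only []
  set p : String → Bool :=
    fun a => (raw.filter (fun x => PySem.Set.contains (PySem.Set.ofList allowed) x)).contains a with hp
  have hidx : (PySem.List.enumerate allowed).foldl
      (fun d q => if d.contains q.2 then d else d.insert q.2 q.1) PySem.Dict.empty
        = pvIdx allowed := rfl
  rw [foldA, hidx]
  simp only [List.contains_nil, Bool.not_false, List.filter_true, List.nil_append]
  have hpmem : ∀ a, p a = true ↔ a ∈ raw ∧ a ∈ allowed := by
    intro a
    simp [hp, List.mem_filter, PySem.Set.contains, PySem.Set.mem_ofList]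
  have hprmem : ∀ a, a ∈ PySem.Set.ofList (raw.filter (fun x => (pvIdx allowed).contains x))
      ↔ a ∈ raw ∧ a ∈ allowed := by
    intro a
    rw [PySem.Set.mem_ofList, List.mem_filter]
    constructor
    · exact fun h => ⟨h.1, (pvIdx_contains allowed a).mp h.2⟩
    · exact fun h => ⟨h.1, (pvIdx_contains allowed a).mpr h.2⟩
  have hperm : (pvFdf p allowed).Perm
      (PySem.Set.ofList (raw.filter (fun x => (pvIdx allowed).contains x))) := by
    rw [List.perm_ext_iff_of_nodup (nodup_pvFdf p allowed) (PySem.Set.nodup_ofList _)]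
    intro a
    rw [mem_pvFdf, hprmem, hpmem]
    tauto
  have hpw : (pvFdf p allowed).Pairwise
      (fun a b => (pvIdx allowed).getD a 0 < (pvIdx allowed).getD b 0) := by
    refine List.Pairwise.imp_of_mem ?_ (pairwise_pvFdf p allowed)
    intro a b ha hb hlt
    have haA : a ∈ allowed := ((mem_pvFdf p allowed a).mp ha).1
    have hbA : b ∈ allowed := ((mem_pvFdf p allowed b).mp hb).1
    rw [pvIdx_getD allowed a haA, pvIdx_getD allowed b hbA]
    exact_mod_cast hlt
  exact (PySem.List.sorted_eq_of_perm_of_pairwise_lt _ _ _ hperm hpw).symm
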